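-- pv_equiv track=rewrite | github.com/yboucher97/Site_And_password_Creator | apps/password-pdf-generator/wifi_pdf/payload_parser.py | _get_password_part
-- ===== SOURCE A (Python) =====
-- from typing import Any
--
-- PASSWORDS_KEYS = ("passwords", "Passwords", "password_list", "Mots_de_passes", "PASSWORD_List")
--
-- def _get_first(mapping: dict[str, Any], keys: tuple[str, ...]) -> Any:
--     for key in keys:
--         if key in mapping:
--             return mapping[key]
--     return None
--
-- def _get_password_part(mapping: dict[str, Any], index: int) -> Any:
--     if index == 1:
--         return _get_first(mapping, PASSWORDS_KEYS)
--
--     part_candidates: list[str] = []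
--     for key in PASSWORDS_KEYS:
--         part_candidates.append(f"{key}_{index}")
--         part_candidates.append(f"{key}{index}")
--     return _get_first(mapping, tuple(part_candidates))
-- ===== SOURCE B (Python) =====
-- from typing import Any
--
-- PASSWORDS_KEYS = ("passwords", "Passwords", "password_list", "Mots_de_passes", "PASSWORD_List")
--
-- def _get_password_part(mapping: dict[str, Any], index: int) -> Any:
--     # Inverted traversal: instead of probing candidate keys against the dict,
--     # scan the dict's items once and keep the value whose key has the lowest
--     # rank in the candidate order.
--     if index == 1:
--         candidates = PASSWORDS_KEYS
--     else:
--         candidates = tuple(c for key in PASSWORDS_KEYS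
--                              for c in (f"{key}_{index}", f"{key}{index}"))
--     best_rank = len(candidates)
--     best_value = None
--     for key, value in mapping.items():
--         try:
--             rank = candidates.index(key)
--         except ValueError:
--             continue
--         if rank < best_rank:
--             best_rank, best_value = rank, value
--     return best_value
-- ===== Notes on version B (the rewrite author's own statement) =====
-- stated objective: alternative
-- what changed: B inverts the traversal: instead of probing each generated candidate key against the dict (A's build-candidates-then-scan via _get_first), it scans the mapping's items once, ranks each key by its position in the candidate order, and returns the value of the lowest-ranked matching key.
import Mathlib
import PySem

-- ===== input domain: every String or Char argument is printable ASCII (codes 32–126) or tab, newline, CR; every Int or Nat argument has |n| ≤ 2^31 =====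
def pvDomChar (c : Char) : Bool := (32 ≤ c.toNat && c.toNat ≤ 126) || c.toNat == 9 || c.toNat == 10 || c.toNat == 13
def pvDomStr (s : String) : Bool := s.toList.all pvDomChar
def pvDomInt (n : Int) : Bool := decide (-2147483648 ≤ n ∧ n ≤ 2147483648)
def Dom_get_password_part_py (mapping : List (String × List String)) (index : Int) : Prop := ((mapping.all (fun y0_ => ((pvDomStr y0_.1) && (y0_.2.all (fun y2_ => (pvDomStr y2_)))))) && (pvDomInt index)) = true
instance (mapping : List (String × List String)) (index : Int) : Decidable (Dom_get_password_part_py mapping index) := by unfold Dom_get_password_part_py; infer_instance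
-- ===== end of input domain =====

-- B inverts the traversal: a single ranked scan over the mapping items instead of probing a built candidate list; objective: alternative.

-- ===== PORT A =====
def pvPasswordsKeys : List String := ["passwords", "Passwords", "password_list", "Mots_de_passes", "PASSWORD_List"]

-- A's helper _get_first: first key of the tuple present in the dict (first-match lookup)
def pvGetFirst (mapping : List (String × List String)) : List String → Option (List String)
  | [] => none
  | k :: rest =>
    match mapping.lookup k with
    | some v => some v
    | none => pvGetFirst mapping rest

def get_password_part_py (mapping : List (String × List String)) (index : Int) : Option (List String) :=
  if index == 1 then
    pvGetFirst mapping pvPasswordsKeys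
  else
    let part_candidates : List String :=
      pvPasswordsKeys.foldl
        (fun acc key => acc ++ [key ++ "_" ++ PySem.Int.toStr index, key ++ PySem.Int.toStr index]) []
    pvGetFirst mapping part_candidates

-- ===== PORT B =====
-- one scan over the mapping's items: keep the value whose key has the lowest rank among the candidates
def pvScanStep (cands : List String) (acc : Nat × Option (List String)) (e : String × List String) :
    Nat × Option (List String) :=
  match PySem.List.index? cands e.1 with       -- candidates.index(key), ValueError -> skip
  | none => acc
  | some rank => if rank < acc.1 then (rank, some e.2) else acc

def pvBest (cands : List String) (mapping : List (String × List String)) :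
    Nat × Option (List String) :=
  mapping.foldl (pvScanStep cands) (cands.length, none)

def get_password_part_py_alt (mapping : List (String × List String)) (index : Int) : Option (List String) :=
  let candidates : List String :=
    if index == 1 then pvPasswordsKeys
    else pvPasswordsKeys.flatMap
      (fun key => [key ++ "_" ++ PySem.Int.toStr index, key ++ PySem.Int.toStr index])
  (pvBest candidates mapping).2

-- ===== PRECONDITION & SPEC =====
def Spec_get_password_part_py (mapping : List (String × List String)) (index : Int) (out : Option (List String)) : Prop := out = get_password_part_py_alt mapping index
instance (mapping : List (String × List String)) (index : Int) (out : Option (List String)) : Decidable (Spec_get_password_part_py mapping index out) := by unfold Spec_get_password_part_py; infer_instance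

-- ===== CLAIM (what is proved, stated in full; the proofs are below) =====
def Claim_equal_get_password_part_py : Prop := ∀ (mapping : List (String × List String)) (index : Int), Dom_get_password_part_py mapping index → Spec_get_password_part_py mapping index (get_password_part_py mapping index)

-- ===== LEMMAS AND PROOFS =====
theorem pvGetFirst_nil (cs : List String) : pvGetFirst [] cs = none := by
  induction cs with
  | nil => rfl
  | cons c cs ih => simp [pvGetFirst, ih]

theorem pvScanStep_none (cands : List String) (acc : Nat × Option (List String))
    (e : String × List String) (h : PySem.List.index? cands e.1 = none) :
    pvScanStep cands acc e = acc := by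
  unfold pvScanStep; rw [h]

theorem pvScanStep_some (cands : List String) (acc : Nat × Option (List String))
    (e : String × List String) {r : Nat} (h : PySem.List.index? cands e.1 = some r) :
    pvScanStep cands acc e = if r < acc.1 then (r, some e.2) else acc := by
  unfold pvScanStep; rw [h]

-- the scan result is either the untouched accumulator or a found pair with rank < |cands|
theorem pvScan_cases (cands : List String) (m : List (String × List String))
    (acc : Nat × Option (List String)) :
    m.foldl (pvScanStep cands) acc = acc ∨
      ∃ r v, m.foldl (pvScanStep cands) acc = (r, some v) ∧ r < cands.length := by
  induction m generalizing acc with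
  | nil => exact Or.inl rfl
  | cons e m ih =>
    rw [List.foldl_cons]
    rcases ih (pvScanStep cands acc e) with h | h
    · rw [h]
      cases hidx : PySem.List.index? cands e.1 with
      | none => rw [pvScanStep_none cands acc e hidx]; exact Or.inl rfl
      | some r =>
        have hr : r < cands.length := (PySem.List.getElem_of_index?_eq_some hidx).1
        rw [pvScanStep_some cands acc e hidx]
        by_cases hlt : r < acc.1
        · exact Or.inr ⟨r, e.2, by rw [if_pos hlt], hr⟩
        · exact Or.inl (by rw [if_neg hlt])
    · exact Or.inr h

-- shifting the accumulator: a scan from acc is the scan from scratch, kept only if it beats acc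
theorem pvScan_shift (cands : List String) (m : List (String × List String))
    (acc : Nat × Option (List String)) (hacc : acc.1 ≤ cands.length) :
    m.foldl (pvScanStep cands) acc =
      if (pvBest cands m).1 < acc.1 then pvBest cands m else acc := by
  induction m generalizing acc with
  | nil =>
    show acc = if (cands.length, (none : Option (List String))).1 < acc.1 then _ else acc
    rw [if_neg (by simp; omega)]
  | cons e m ih =>
    show (List.foldl (pvScanStep cands) (pvScanStep cands acc e) m) =
      if (List.foldl (pvScanStep cands) (pvScanStep cands (cands.length, none) e) m).1 < acc.1
      then List.foldl (pvScanStep cands) (pvScanStep cands (cands.length, none) e) m else acc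
    cases hidx : PySem.List.index? cands e.1 with
    | none =>
      rw [pvScanStep_none cands acc e hidx, pvScanStep_none cands _ e hidx]
      exact ih acc hacc
    | some r =>
      have hr : r < cands.length := (PySem.List.getElem_of_index?_eq_some hidx).1
      rw [pvScanStep_some cands acc e hidx, pvScanStep_some cands _ e hidx, if_pos hr]
      by_cases hlt : r < acc.1
      · rw [if_pos hlt, ih (r, e.2) (le_of_lt hr)]
        split_ifs <;> first | rfl | omega
      · rw [if_neg hlt, ih acc hacc, ih (r, e.2) (le_of_lt hr)]
        split_ifs <;> first | rfl | omega

-- index? on a take-prefix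
theorem index?_take (cands : List String) (r : Nat) (k : String) :
    PySem.List.index? (cands.take r) k =
      match PySem.List.index? cands k with
      | some j => if j < r then some j else none
      | none => none := by
  induction cands generalizing r with
  | nil => simp [PySem.List.index?_eq_idxOf?, List.idxOf?]
  | cons c cs ih =>
    cases r with
    | zero =>
      simp only [List.take_zero]
      cases h : PySem.List.index? (c :: cs) k <;>
        simp [PySem.List.index?_eq_idxOf?, List.idxOf?]
    | succ r =>
      simp only [List.take_succ_cons]
      by_cases hck : c = k
      · subst hck
        rw [PySem.List.index?_cons_self, PySem.List.index?_cons_self]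
        simp
      · rw [PySem.List.index?_cons_of_ne (cs.take r) hck,
            PySem.List.index?_cons_of_ne cs hck, ih r]
        cases h : PySem.List.index? cs k with
        | none => simp
        | some j =>
          simp only [Option.map_some]
          by_cases hj : j < r
          · have h1 : j + 1 < r + 1 := by omega
            simp [hj, h1]
          · have h1 : ¬ (j + 1 < r + 1) := by omega
            simp [hj, h1]

-- _get_first on an extended mapping, in terms of the new entry's rank among the candidates
theorem pvGetFirst_cons (m : List (String × List String)) (k : String) (v : List String)
    (cs : List String) :
    pvGetFirst ((k, v) :: m) cs =
      match PySem.List.index? cs k with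
      | none => pvGetFirst m cs
      | some r =>
        match pvGetFirst m (cs.take r) with
        | some w => some w
        | none => some v := by
  induction cs with
  | nil => simp [pvGetFirst, PySem.List.index?_eq_idxOf?, List.idxOf?]
  | cons c cs ih =>
    by_cases hck : c = k
    · subst hck
      rw [PySem.List.index?_cons_self]
      simp [pvGetFirst, List.lookup]
    · rw [PySem.List.index?_cons_of_ne cs hck]
      have hlk : List.lookup c ((k, v) :: m) = List.lookup c m := by
        have : (c == k) = false := by simp [hck]
        simp [List.lookup, this]
      cases hmc : List.lookup c m with
      | some w =>
        cases h : PySem.List.index? cs k with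
        | none => simp [pvGetFirst, hlk, hmc]
        | some r =>
          simp only [Option.map_some]
          simp [pvGetFirst, hlk, hmc, List.take_succ_cons]
      | none =>
        cases h : PySem.List.index? cs k with
        | none =>
          have h2 : List.idxOf? k cs = none := by
            rw [← PySem.List.index?_eq_idxOf?]; exact h
          show pvGetFirst ((k, v) :: m) (c :: cs) = pvGetFirst m (c :: cs)
          simp [pvGetFirst, hlk, hmc, ih, h2]
        | some r =>
          simp only [Option.map_some]
          simp only [pvGetFirst, hlk, hmc, List.take_succ_cons, ih, h]

theorem pvGetFirst_cons_none (m : List (String × List String)) (k : String) (v : List String)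
    (cs : List String) (h : PySem.List.index? cs k = none) :
    pvGetFirst ((k, v) :: m) cs = pvGetFirst m cs := by
  rw [pvGetFirst_cons, h]

theorem pvGetFirst_cons_some (m : List (String × List String)) (k : String) (v : List String)
    (cs : List String) {r : Nat} (h : PySem.List.index? cs k = some r) :
    pvGetFirst ((k, v) :: m) cs =
      match pvGetFirst m (cs.take r) with
      | some w => some w
      | none => some v := by
  rw [pvGetFirst_cons, h]

theorem pvBest_cons_none (cands : List String) (m : List (String × List String))
    (k : String) (v : List String) (h : PySem.List.index? cands k = none) :
    pvBest cands ((k, v) :: m) = pvBest cands m := by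
  show List.foldl (pvScanStep cands) (pvScanStep cands (cands.length, none) (k, v)) m = _
  rw [pvScanStep_none cands _ (k, v) h]
  rfl

theorem pvBest_cons_some (cands : List String) (m : List (String × List String))
    (k : String) (v : List String) {j : Nat} (h : PySem.List.index? cands k = some j) :
    pvBest cands ((k, v) :: m) =
      if (pvBest cands m).1 < j then pvBest cands m else (j, some v) := by
  have hj : j < cands.length := (PySem.List.getElem_of_index?_eq_some h).1
  show List.foldl (pvScanStep cands) (pvScanStep cands (cands.length, none) (k, v)) m = _
  rw [pvScanStep_some cands _ (k, v) h, if_pos hj]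
  exact pvScan_shift cands m (j, some v) (le_of_lt hj)

-- main invariant: _get_first over the first r candidates = the scan's best, if its rank beats r
theorem pvGetFirst_take_eq_best (cands : List String) (m : List (String × List String))
    (r : Nat) :
    pvGetFirst m (cands.take r) =
      if (pvBest cands m).1 < r then (pvBest cands m).2 else none := by
  induction m generalizing r with
  | nil =>
    rw [pvGetFirst_nil]
    show none = if (cands.length, (none : Option (List String))).1 < r then
      (cands.length, (none : Option (List String))).2 else none
    split <;> rfl
  | cons e m ih =>
    obtain ⟨k, v⟩ := e
    cases hidx : PySem.List.index? cands k with
    | none =>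
      have h' : PySem.List.index? (cands.take r) k = none := by
        rw [index?_take, hidx]
      rw [pvGetFirst_cons_none m k v _ h', pvBest_cons_none cands m k v hidx]
      exact ih r
    | some j =>
      have hj : j < cands.length := (PySem.List.getElem_of_index?_eq_some hidx).1
      rw [pvBest_cons_some cands m k v hidx]
      by_cases hjr : j < r
      · have h' : PySem.List.index? (cands.take r) k = some j := by
          rw [index?_take, hidx]; simp [hjr]
        rw [pvGetFirst_cons_some m k v _ h', List.take_take,
            min_eq_left (Nat.le_of_lt hjr), ih j]
        by_cases hb : (pvBest cands m).1 < j
        · rw [if_pos hb, if_pos hb]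
          rcases pvScan_cases cands m (cands.length, none) with h2 | ⟨r', v', h2, hr'⟩
          · exfalso
            have h3 : pvBest cands m = (cands.length, none) := h2
            rw [h3] at hb
            simp at hb
            omega
          · have h3 : pvBest cands m = (r', some v') := h2
            rw [h3] at hb ⊢
            simp at hb ⊢
            omega
        · rw [if_neg hb, if_neg hb]
          simp [hjr]
      · have h' : PySem.List.index? (cands.take r) k = none := by
          rw [index?_take, hidx]; simp [hjr]
        rw [pvGetFirst_cons_none m k v _ h', ih r]
        by_cases hb : (pvBest cands m).1 < j
        · rw [if_pos hb]
        · rw [if_neg hb]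
          have hjv : ((j : Nat), some v).1 = j := rfl
          rw [hjv, if_neg hjr, if_neg (by omega)]

theorem pvGetFirst_eq_best (cands : List String) (m : List (String × List String)) :
    pvGetFirst m cands = (pvBest cands m).2 := by
  have h := pvGetFirst_take_eq_best cands m cands.length
  rw [List.take_length] at h
  rw [h]
  by_cases hb : (pvBest cands m).1 < cands.length
  · rw [if_pos hb]
  · rw [if_neg hb]
    rcases pvScan_cases cands m (cands.length, none) with h2 | ⟨r', v', h2, hr'⟩
    · have h3 : pvBest cands m = (cands.length, none) := h2
      rw [h3]
    · have h3 : pvBest cands m = (r', some v') := h2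
      rw [h3] at hb
      exact absurd hr' hb

-- ===== VERDICT (by name: the statement is the Claim_ definition above) =====
theorem get_password_part_py_spec : Claim_equal_get_password_part_py := by
  intro mapping index _
  unfold Spec_get_password_part_py get_password_part_py get_password_part_py_alt
  by_cases h : index == 1
  · simp only [h, if_true]
    exact pvGetFirst_eq_best pvPasswordsKeys mapping
  · simp only [h, Bool.false_eq_true, if_false]
    rw [PySem.List.foldl_append_eq_flatMap, List.nil_append]
    exact pvGetFirst_eq_best _ mapping
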